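-- pv_equiv track=rewrite | github.com/cppjocker/resonanse_dna | дживас/purine_utils.py | calc_RY
-- ===== SOURCE A (Python) =====
-- def calc_RY(seq, pos, nucl):
--     R_chain_len = 0
--     Y_chain_len = 0
--
--     ry_nucl = RY(nucl)
--
--
--     if ry_nucl == 'R':
--         R_chain_len = 1
--         Y_chain_len = 0
--         ry_nucl_compl = 'Y'
--     else:
--         R_chain_len = 0
--         Y_chain_len = 1
--
--         ry_nucl_compl = 'R'
--
--     chain_len = 0
--
--     for i in range(pos - 1, 0, -1):
--         if RY(seq[i]) != ry_nucl:
--             break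
--
--         chain_len+=1
--
--     for i in range(pos + 1, len(seq)):
--         if RY(seq[i]) != ry_nucl:
--             break
--
--         chain_len+=1
--
--     if ry_nucl == 'R':
--         R_chain_len += chain_len
--     else:
--         Y_chain_len += chain_len
--
--     chain_len_compl_neg = 0
--     chain_len_compl_pos = 0
--
--     for i in range(pos - 1, 0, -1):
--         if RY(seq[i]) != ry_nucl_compl:
--             break
--
--         chain_len_compl_neg+=1
--
--     for i in range(pos + 1, len(seq)):
--         if RY(seq[i]) != ry_nucl_compl:
--             break
--
--         chain_len_compl_pos+=1
--
--     chain_len_compl = max(chain_len_compl_neg, chain_len_compl_pos)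
--
--     if ry_nucl_compl == 'R':
--         R_chain_len += chain_len_compl
--     else:
--         Y_chain_len += chain_len_compl
--
--     return R_chain_len, Y_chain_len
--
-- def RY(nucl):
--     if (nucl == 'A') or (nucl == 'G'):
--         return 'R'
--     else:
--         return 'Y'
-- ===== SOURCE B (Python) =====
-- def calc_RY(seq, pos, nucl):
--     # Two scans total (one per direction), each returning (run_length, run_class);
--     # then combine: SUM for the position's own class, MAX for the complement.
--     def ry_of(x):
--         return 'R' if x in ('A', 'G') else 'Y'
--
--     def run(indices):
--         n = 0
--         first = None
--         for i in indices:
--             c = ry_of(seq[i])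
--             if first is None:
--                 first = c
--             if c != first:
--                 break
--             n += 1
--         return n, first
--
--     left_n, left_c = run(range(pos - 1, 0, -1))
--     right_n, right_c = run(range(pos + 1, len(seq)))
--
--     ry = ry_of(nucl)
--     comp = 'Y' if ry == 'R' else 'R'
--     same = (left_n if left_c == ry else 0) + (right_n if right_c == ry else 0)
--     comp_len = max(left_n if left_c == comp else 0,
--                    right_n if right_c == comp else 0)
--
--     if ry == 'R':
--         return 1 + same, comp_len
--     else:
--         return comp_len, 1 + same
-- ===== Notes on version B (the rewrite author's own statement) =====
-- stated objective: simpler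
-- what changed: Replaces A's four independent break-loops (left/right for the position's class, left/right for the complement) with one run-scan per direction that returns (run_length, run_class), combining them afterwards by sum for the own class and max for the complement.
import Mathlib
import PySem

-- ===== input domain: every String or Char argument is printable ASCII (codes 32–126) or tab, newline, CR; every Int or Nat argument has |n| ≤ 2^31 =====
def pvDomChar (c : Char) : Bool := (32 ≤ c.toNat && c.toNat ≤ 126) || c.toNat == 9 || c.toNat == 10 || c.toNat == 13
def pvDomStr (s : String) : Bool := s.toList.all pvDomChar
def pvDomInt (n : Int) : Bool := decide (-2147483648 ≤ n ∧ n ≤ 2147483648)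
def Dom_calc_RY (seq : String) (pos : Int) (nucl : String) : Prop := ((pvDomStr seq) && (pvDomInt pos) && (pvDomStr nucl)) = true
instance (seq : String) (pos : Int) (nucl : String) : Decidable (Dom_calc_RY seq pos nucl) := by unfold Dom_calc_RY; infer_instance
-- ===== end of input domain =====

-- B merges A's four break-loops into one run-scan per direction (length + class of the
-- adjacent run), combined by sum/max; objective: simpler. Same return value on Pre_.

-- ===== PORT A =====
-- RY() applied to the nucl string and to single characters seq[i]
def RYs (s : String) : Char := if s = "A" ∨ s = "G" then 'R' else 'Y'
def RYc (c : Char) : Char := if c = 'A' ∨ c = 'G' then 'R' else 'Y'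

-- one of A's break-loops: count while RY(seq[i]) == target.
-- pyGet? = none is where Python raises IndexError (excluded by Pre_); port stops there.
def countRun (cs : List Char) (target : Char) : List Int → Int
  | [] => 0
  | i :: rest =>
    match PySem.List.pyGet? cs i with
    | none => 0
    | some c => if RYc c ≠ target then 0 else 1 + countRun cs target rest

def calc_RY (seq : String) (pos : Int) (nucl : String) : Int × Int :=
  let cs := seq.toList
  let ry := RYs nucl
  let r0 : Int := if ry = 'R' then 1 else 0
  let y0 : Int := if ry = 'R' then 0 else 1
  let comp : Char := if ry = 'R' then 'Y' else 'R'
  -- chain_len accumulated over the two 'same-class' loops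
  let chain := countRun cs ry (PySem.List.pyRange (pos - 1) 0 (-1))
             + countRun cs ry (PySem.List.pyRange (pos + 1) cs.length 1)
  let r1 := if ry = 'R' then r0 + chain else r0
  let y1 := if ry = 'R' then y0 else y0 + chain
  let cn := countRun cs comp (PySem.List.pyRange (pos - 1) 0 (-1))
  let cp := countRun cs comp (PySem.List.pyRange (pos + 1) cs.length 1)
  let cc := max cn cp
  if comp = 'R' then (r1 + cc, y1) else (r1, y1 + cc)

-- ===== PORT B =====
def ryB (c : Char) : Char := if c = 'A' ∨ c = 'G' then 'R' else 'Y'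
def ryBs (s : String) : Char := if s = "A" ∨ s = "G" then 'R' else 'Y'

-- B's run(): one scan recording (length, class) of the consecutive run.
-- pyGet? = none is where Python raises IndexError (excluded by Pre_); port stops there.
def runScan (cs : List Char) (first : Option Char) (n : Int) : List Int → Int × Option Char
  | [] => (n, first)
  | i :: rest =>
    match PySem.List.pyGet? cs i with
    | none => (n, first)
    | some ch =>
      let c := ryB ch
      let f := first.getD c
      if c ≠ f then (n, some f) else runScan cs (some f) (n + 1) rest

def calc_RY_alt (seq : String) (pos : Int) (nucl : String) : Int × Int :=
  let cs := seq.toList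
  let L := runScan cs none 0 (PySem.List.pyRange (pos - 1) 0 (-1))
  let Rt := runScan cs none 0 (PySem.List.pyRange (pos + 1) cs.length 1)
  let ry := ryBs nucl
  let comp : Char := if ry = 'R' then 'Y' else 'R'
  let same := (if L.2 = some ry then L.1 else 0) + (if Rt.2 = some ry then Rt.1 else 0)
  let compLen := max (if L.2 = some comp then L.1 else 0) (if Rt.2 = some comp then Rt.1 else 0)
  if ry = 'R' then (1 + same, compLen) else (compLen, 1 + same)

-- ===== PRECONDITION & SPEC =====
-- Pre_ excludes exactly the inputs on which A raises IndexError (a loop index out of range).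
def Pre_calc_RY (seq : String) (pos : Int) (nucl : String) : Prop :=
  (pos ≤ (seq.toList.length : Int) ∨ pos ≤ 1) ∧ -(seq.toList.length : Int) - 1 ≤ pos

instance (seq : String) (pos : Int) (nucl : String) : Decidable (Pre_calc_RY seq pos nucl) := by
  unfold Pre_calc_RY; infer_instance

def pvWitness_calc_RY : String × Int × String := ("AGCTA", 2, "A")

def Spec_calc_RY (seq : String) (pos : Int) (nucl : String) (out : Int × Int) : Prop := out = calc_RY_alt seq pos nucl
instance (seq : String) (pos : Int) (nucl : String) (out : Int × Int) : Decidable (Spec_calc_RY seq pos nucl out) := by unfold Spec_calc_RY; infer_instance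

-- ===== CLAIM (what is proved, stated in full; the proofs are below) =====
def Claim_equal_calc_RY : Prop := ∀ (seq : String) (pos : Int) (nucl : String), Dom_calc_RY seq pos nucl → Pre_calc_RY seq pos nucl → Spec_calc_RY seq pos nucl (calc_RY seq pos nucl)

-- ===== LEMMAS AND PROOFS =====

theorem ryB_eq_RYc (c : Char) : ryB c = RYc c := rfl
theorem ryBs_eq_RYs (s : String) : ryBs s = RYs s := rfl

-- run-scan with the class already fixed counts exactly like A's break-loop
theorem runScan_some (cs : List Char) (f : Char) (idxs : List Int) (n : Int) :
    runScan cs (some f) n idxs = (n + countRun cs f idxs, some f) := by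
  induction idxs generalizing n with
  | nil => simp [runScan, countRun]
  | cons i rest ih =>
    simp only [runScan, countRun]
    cases h : PySem.List.pyGet? cs i with
    | none => simp
    | some ch =>
      simp only [Option.getD_some, ryB_eq_RYc]
      by_cases hc : RYc ch = f
      · simp [hc, ih]; ring
      · simp [hc]

-- A's break-loop for target t equals B's run-scan filtered by whether the run's class is t
theorem countRun_eq (cs : List Char) (idxs : List Int) (t : Char) :
    countRun cs t idxs =
      (if (runScan cs none 0 idxs).2 = some t then (runScan cs none 0 idxs).1 else 0) := by
  cases idxs with
  | nil => simp [runScan, countRun]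
  | cons i rest =>
    simp only [runScan, countRun]
    cases h : PySem.List.pyGet? cs i with
    | none => simp
    | some ch =>
      simp only [Option.getD_none, ryB_eq_RYc, ne_eq, not_true_eq_false, if_false,
        runScan_some]
      by_cases ht : RYc ch = t
      · simp [ht]
      · simp [ht]

-- ===== VERDICT (by name: the statement is the Claim_ definition above) =====
theorem calc_RY_spec : Claim_equal_calc_RY := by
  intro seq pos nucl _ _
  unfold Spec_calc_RY calc_RY calc_RY_alt
  simp only [ryBs_eq_RYs]
  by_cases h : RYs nucl = 'R' <;> simp [h, countRun_eq]
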